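-- pv_equiv track=rewrite | github.com/zjyuan1208/ESN_dual_channel | echotorch/nn/reservoir/EuESN_maml.py | detect_non_empty_zero_regions
-- ===== SOURCE A (Python) =====
-- def detect_non_empty_zero_regions(time_series):
--     zero_regions = []
--     in_zero_region = False
--     start_idx = None
--
--     for i, value in enumerate(time_series):
--         if value < 10:
--             if not in_zero_region:
--                 start_idx = i
--                 in_zero_region = True
--         else:
--             if in_zero_region:
--                 if start_idx != i - 10:  # Exclude zero regions with no beats
--                     zero_regions.append((start_idx, i))
--                 in_zero_region = False
--
--     return zero_regions
-- ===== SOURCE B (Python) =====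
-- def detect_non_empty_zero_regions(time_series):
--     # Run-length decomposition: collect maximal constant runs of the mask
--     # (value < 10), then keep closed below-threshold runs of length != 10.
--     runs = []          # completed runs: (below?, start, length)
--     cur = None         # current open run, same shape
--     for i, value in enumerate(time_series):
--         below = value < 10
--         if cur is not None and cur[0] == below:
--             cur = (below, cur[1], cur[2] + 1)
--         else:
--             if cur is not None:
--                 runs.append(cur)
--             cur = (below, i, 1)
--     # cur (the trailing run) is never closed, so it is dropped
--     return [(s, s + n) for (b, s, n) in runs if b and n != 10]
-- ===== Notes on version B (the rewrite author's own statement) =====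
-- stated objective: alternative
-- what changed: Replaces A's per-element in_zero_region flag machine (which appends output inside the loop) with a run-length decomposition: one pass collects maximal constant runs of the mask value<10 with their start index and length, then a comprehension emits (start, start+len) for closed below-runs of length != 10, implicitly dropping the trailing unclosed run.
import Mathlib
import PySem

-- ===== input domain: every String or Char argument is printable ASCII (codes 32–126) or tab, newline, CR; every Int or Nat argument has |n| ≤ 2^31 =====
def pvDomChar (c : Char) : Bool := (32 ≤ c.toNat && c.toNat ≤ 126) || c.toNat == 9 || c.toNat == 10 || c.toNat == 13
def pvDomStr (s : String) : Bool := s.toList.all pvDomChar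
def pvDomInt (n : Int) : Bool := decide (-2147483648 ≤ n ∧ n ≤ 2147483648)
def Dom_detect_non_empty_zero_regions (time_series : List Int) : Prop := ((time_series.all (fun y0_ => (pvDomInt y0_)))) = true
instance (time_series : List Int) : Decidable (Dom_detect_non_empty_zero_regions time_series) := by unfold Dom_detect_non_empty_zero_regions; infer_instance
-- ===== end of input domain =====

-- B re-implements A by run-length decomposition (collect maximal constant runs
-- of the mask value < 10, then filter/emit) instead of A's per-element flag
-- state machine; objective: alternative decomposition, same cost.

-- ===== PORT A =====
-- loop body of A's for-loop; state = (zero_regions, in_zero_region, start_idx)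
def pvStepA (st : List (Int × Int) × Bool × Option Int) (p : Int × Int) :
    List (Int × Int) × Bool × Option Int :=
  if p.2 < 10 then
    if st.2.1 = false then (st.1, true, some p.1) else st
  else
    if st.2.1 = true then
      (if st.2.2 ≠ some (p.1 - 10) then st.1 ++ [(st.2.2.getD 0, p.1)] else st.1,
       false, st.2.2)
    else st

def detect_non_empty_zero_regions (time_series : List Int) : List (Int × Int) :=
  ((PySem.List.enumerate time_series).foldl pvStepA ([], false, none)).1

-- ===== PORT B =====
-- loop body of B's for-loop; state = (completed runs, current open run),
-- a run is (below?, start, length)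
def pvStepB (st : List (Bool × Int × Int) × Option (Bool × Int × Int)) (p : Int × Int) :
    List (Bool × Int × Int) × Option (Bool × Int × Int) :=
  let below := decide (p.2 < 10)
  match st.2 with
  | some c =>
      if c.1 = below then (st.1, some (below, c.2.1, c.2.2 + 1))
      else (st.1 ++ [c], some (below, p.1, 1))
  | none => (st.1, some (below, p.1, 1))

-- B's final comprehension over the completed runs
def pvRender (runs : List (Bool × Int × Int)) : List (Int × Int) :=
  runs.filterMap (fun r => if r.1 = true ∧ r.2.2 ≠ 10 then some (r.2.1, r.2.1 + r.2.2) else none)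

def detect_non_empty_zero_regions_alt (time_series : List Int) : List (Int × Int) :=
  pvRender ((PySem.List.enumerate time_series).foldl pvStepB ([], none)).1

-- ===== PRECONDITION & SPEC =====
def Spec_detect_non_empty_zero_regions (time_series : List Int) (out : List (Int × Int)) : Prop := out = detect_non_empty_zero_regions_alt time_series
instance (time_series : List Int) (out : List (Int × Int)) : Decidable (Spec_detect_non_empty_zero_regions time_series out) := by unfold Spec_detect_non_empty_zero_regions; infer_instance

-- ===== CLAIM (what is proved, stated in full; the proofs are below) =====
def Claim_equal_detect_non_empty_zero_regions : Prop := ∀ (time_series : List Int), Dom_detect_non_empty_zero_regions time_series → Spec_detect_non_empty_zero_regions time_series (detect_non_empty_zero_regions time_series)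

-- ===== LEMMAS AND PROOFS =====

-- Invariant linking A's state to B's state after processing indices < i
def pvInv (i : Int) (sa : List (Int × Int) × Bool × Option Int)
    (sb : List (Bool × Int × Int) × Option (Bool × Int × Int)) : Prop :=
  match sb.2 with
  | none => sb.1 = [] ∧ sa.1 = [] ∧ sa.2.1 = false
  | some (b, s, n) =>
      sa.1 = pvRender sb.1 ∧ i = s + n ∧
      (if b then sa.2.1 = true ∧ sa.2.2 = some s else sa.2.1 = false)

theorem pvRender_append (runs : List (Bool × Int × Int)) (c : Bool × Int × Int) :
    pvRender (runs ++ [c]) =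
      pvRender runs ++ (if c.1 = true ∧ c.2.2 ≠ 10 then [(c.2.1, c.2.1 + c.2.2)] else []) := by
  by_cases h : c.1 = true ∧ c.2.2 ≠ 10 <;>
    simp [pvRender, List.filterMap_append, h]

theorem pvInv_step (i x : Int) (sa : List (Int × Int) × Bool × Option Int)
    (sb : List (Bool × Int × Int) × Option (Bool × Int × Int))
    (h : pvInv i sa sb) : pvInv (i + 1) (pvStepA sa (i, x)) (pvStepB sb (i, x)) := by
  obtain ⟨regs, flag, start⟩ := sa
  obtain ⟨runs, cur⟩ := sb
  match cur with
  | none =>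
    obtain ⟨h1, h2, h3⟩ := h
    simp only at h1 h2 h3
    subst h1 h2 h3
    by_cases hx : x < 10 <;> simp [pvInv, pvStepA, pvStepB, hx, pvRender]
  | some (b, s, n) =>
    obtain ⟨h1, h2, h3⟩ := h
    simp only at h1 h3
    cases b
    · -- current run is an above-run
      simp only [Bool.false_eq_true, if_false] at h3
      subst h3 h1
      by_cases hx : x < 10
      · -- below value arrives: B closes the above-run (renders nothing), A opens a region
        simp [pvInv, pvStepA, pvStepB, hx, pvRender_append]
      · -- above-run continues
        simp [pvInv, pvStepA, pvStepB, hx]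
        omega
    · -- current run is a below-run
      simp only [if_true] at h3
      obtain ⟨hf, hs⟩ := h3
      subst hf hs h1
      by_cases hx : x < 10
      · -- below-run continues
        simp [pvInv, pvStepA, pvStepB, hx]
        omega
      · -- below-run closes: A appends iff start ≠ i-10, i.e. iff n ≠ 10
        by_cases hn : n = 10
        · subst hn
          have hs10 : s + 10 - 10 = s := by omega
          simp [pvInv, pvStepA, pvStepB, hx, pvRender_append, h2, hs10]
        · simp [pvInv, pvStepA, pvStepB, hx, pvRender_append, hn, h2,
                show ¬ s = s + n - 10 by omega]

theorem pvInv_fold (xs : List Int) : ∀ (i : Int) sa sb, pvInv i sa sb →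
    ((PySem.List.enumerate xs i).foldl pvStepA sa).1 =
      pvRender ((PySem.List.enumerate xs i).foldl pvStepB sb).1 := by
  induction xs with
  | nil =>
    intro i sa sb h
    obtain ⟨runs, cur⟩ := sb
    match cur with
    | none => simp [PySem.List.enumerate_nil, h.2.1, h.1, pvRender]
    | some (b, s, n) => exact h.1
  | cons x xs ih =>
    intro i sa sb h
    simp only [PySem.List.enumerate_cons, List.foldl_cons]
    exact ih (i + 1) _ _ (pvInv_step i x sa sb h)

-- ===== VERDICT (by name: the statement is the Claim_ definition above) =====
theorem detect_non_empty_zero_regions_spec : Claim_equal_detect_non_empty_zero_regions := by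
  intro ts _
  show _ = _
  unfold detect_non_empty_zero_regions detect_non_empty_zero_regions_alt
  exact pvInv_fold ts 0 ([], false, none) ([], none) (by simp [pvInv])
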